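-- pv_equiv track=rewrite | github.com/nixii/oante | src/oante/__init__.py | split_punct
-- ===== SOURCE A (Python) =====
-- toki_pona_letters = list("aeiouptklmnswj")
--
-- def split_punct(word):
--      just_word = ""
--      punct = ""
--
--      for i, char in enumerate(word):
--           if char.lower() not in toki_pona_letters:
--                punct = word[i:]
--                break
--           just_word += char.lower()
--
--      return (just_word, punct)
-- ===== SOURCE B (Python) =====
-- toki_pona_letters = list("aeiouptklmnswj")
--
-- def split_punct(word):
--     idx = next((i for i, char in enumerate(word)
--                 if char.lower() not in toki_pona_letters), len(word))
--     return (word[:idx].lower(), word[idx:])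
-- ===== Notes on version B (the rewrite author's own statement) =====
-- stated objective: simpler
-- what changed: Replaces the accumulating loop with manual break by a boundary search (first index whose lowercase is not a Toki Pona letter) followed by two slices, lowercasing the prefix in one step.
import Mathlib
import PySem

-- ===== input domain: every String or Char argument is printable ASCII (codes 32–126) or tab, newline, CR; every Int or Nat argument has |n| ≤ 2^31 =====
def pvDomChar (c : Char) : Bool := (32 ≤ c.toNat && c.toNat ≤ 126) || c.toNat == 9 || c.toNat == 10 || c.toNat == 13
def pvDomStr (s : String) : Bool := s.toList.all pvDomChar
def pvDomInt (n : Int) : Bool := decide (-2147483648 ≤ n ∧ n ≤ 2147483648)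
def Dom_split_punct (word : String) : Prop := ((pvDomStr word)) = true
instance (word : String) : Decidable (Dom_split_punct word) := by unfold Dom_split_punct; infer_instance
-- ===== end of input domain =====

-- B replaces A's accumulating loop-with-break by a boundary search followed by two slices (simpler decomposition).

-- ===== PORT A =====
def tpLetters : List Char := "aeiouptklmnswj".toList

-- the for-loop of A: rest = word[i:], `just` the accumulator; the `break` branch returns word[i:]
def splitPunctGo (rest : List Char) (i : Nat) (just : List Char) (word : List Char) :
    List Char × List Char :=
  match rest with
  | [] => (just, [])
  | c :: cs =>
      if PySem.Chars.lowerChar c ∈ tpLetters then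
        splitPunctGo cs (i + 1) (just ++ [PySem.Chars.lowerChar c]) word
      else
        (just, word.drop i)

def split_punct (word : String) : String × String :=
  (String.ofList (splitPunctGo word.toList 0 [] word.toList).1,
   String.ofList (splitPunctGo word.toList 0 [] word.toList).2)

-- ===== PORT B =====
def split_punct_alt (word : String) : String × String :=
  (String.ofList (PySem.Chars.lower
     (word.toList.take (word.toList.findIdx (fun c => PySem.Chars.lowerChar c ∉ tpLetters)))),
   String.ofList
     (word.toList.drop (word.toList.findIdx (fun c => PySem.Chars.lowerChar c ∉ tpLetters))))

-- ===== PRECONDITION & SPEC =====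
def Spec_split_punct (word : String) (out : String × String) : Prop := out = split_punct_alt word
instance (word : String) (out : String × String) : Decidable (Spec_split_punct word out) := by unfold Spec_split_punct; infer_instance

-- ===== CLAIM (what is proved, stated in full; the proofs are below) =====
def Claim_equal_split_punct : Prop := ∀ (word : String), Dom_split_punct word → Spec_split_punct word (split_punct word)

-- ===== LEMMAS AND PROOFS =====

theorem take_findIdx_eq_takeWhile {α : Type} (q : α → Bool) (l : List α) :
    l.take (l.findIdx q) = l.takeWhile (fun a => !q a) := by
  induction l with
  | nil => rfl
  | cons a t ih =>
      by_cases h : q a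
      · simp [List.findIdx_cons, List.takeWhile_cons, h]
      · simp [List.findIdx_cons, List.takeWhile_cons, h, ih]

theorem drop_findIdx_eq_dropWhile {α : Type} (q : α → Bool) (l : List α) :
    l.drop (l.findIdx q) = l.dropWhile (fun a => !q a) := by
  induction l with
  | nil => rfl
  | cons a t ih =>
      by_cases h : q a
      · simp [List.findIdx_cons, List.dropWhile_cons, h]
      · simp [List.findIdx_cons, List.dropWhile_cons, h, ih]

theorem splitPunctGo_spec (rest : List Char) (i : Nat) (just : List Char) (word : List Char)
    (h : rest = word.drop i) :
    splitPunctGo rest i just word =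
      (just ++ PySem.Chars.lower
          (rest.takeWhile (fun c => PySem.Chars.lowerChar c ∈ tpLetters)),
       rest.dropWhile (fun c => PySem.Chars.lowerChar c ∈ tpLetters)) := by
  induction rest generalizing i just with
  | nil => simp [splitPunctGo, PySem.Chars.lower]
  | cons c cs ih =>
      by_cases hc : PySem.Chars.lowerChar c ∈ tpLetters
      · have hcs : cs = word.drop (i + 1) := by
          have := congrArg (List.drop 1) h
          simpa [List.drop_drop, Nat.add_comm] using this
        simp [splitPunctGo, hc, List.takeWhile_cons, List.dropWhile_cons,
          ih (i + 1) (just ++ [PySem.Chars.lowerChar c]) hcs, PySem.Chars.lower]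
      · simp [splitPunctGo, hc, ← h, PySem.Chars.lower]

theorem tp_pred_eq :
    (fun c : Char => !decide (PySem.Chars.lowerChar c ∉ tpLetters)) =
      (fun c : Char => decide (PySem.Chars.lowerChar c ∈ tpLetters)) := by
  funext c; simp

-- ===== VERDICT (by name: the statement is the Claim_ definition above) =====
theorem split_punct_spec : Claim_equal_split_punct := by
  intro word _
  show _ = _
  unfold split_punct split_punct_alt
  rw [splitPunctGo_spec word.toList 0 [] word.toList (by simp),
    take_findIdx_eq_takeWhile, drop_findIdx_eq_dropWhile, tp_pred_eq]
  simp
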